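-- pv_equiv track=rewrite | github.com/BeardedTinker/Home-Assistant_Config | custom_components/open_epaper_link/imagegen.py | _get_rounded_corners
-- ===== SOURCE A (Python) =====
-- def _get_rounded_corners(corner_string: str) -> tuple[bool, bool, bool, bool]:
--     """Get rounded corner configuration.
--
--     Parses a string specifying which corners of a rectangle should be rounded.
--
--     Args:
--         corner_string: String specifying corners to round ("all" or comma-separated list)
--
--     Returns:
--         tuple: Boolean flags for (top_left, top_right, bottom_right, bottom_left)
--     """
--     if corner_string == "all":
--         return True, True, True, True
--
--     corners = corner_string.split(",")
--     corner_map = {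
--         "top_left": 0,
--         "top_right": 1,
--         "bottom_right": 2,
--         "bottom_left": 3
--     }
--
--     result = [False] * 4
--     for corner in corners:
--         corner = corner.strip()
--         if corner in corner_map:
--             result[corner_map[corner]] = True
--
--     return result[0], result[1], result[2], result[3]
-- ===== SOURCE B (Python) =====
-- def _corner_bit(name: str) -> int:
--     if name == "top_left":
--         return 1
--     if name == "top_right":
--         return 2
--     if name == "bottom_right":
--         return 4
--     if name == "bottom_left":
--         return 8
--     return 0
--
--
-- def _get_rounded_corners(corner_string: str) -> tuple[bool, bool, bool, bool]:
--     if corner_string == "all":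
--         return True, True, True, True
--     # single character-level scan: tokenize by hand into a bitmask, no split(),
--     # no mutable 4-slot result list; decode the four flags from the mask bits
--     mask = 0
--     token = ""
--     for ch in corner_string + ",":
--         if ch == ",":
--             mask |= _corner_bit(token.strip())
--             token = ""
--         else:
--             token += ch
--     return bool(mask & 1), bool(mask & 2), bool(mask & 4), bool(mask & 8)
-- ===== Notes on version B (the rewrite author's own statement) =====
-- stated objective: alternative
-- what changed: A splits the string with split(), then loops over the tokens assigning True into a mutable 4-slot list through a name-to-index dict; B never calls split() or builds a result list: one hand-written character-level scan folds each comma-delimited token's bit (via an if-chain) into an integer bitmask, and the four flags are decoded from the mask bits at the end.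
import Mathlib
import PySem

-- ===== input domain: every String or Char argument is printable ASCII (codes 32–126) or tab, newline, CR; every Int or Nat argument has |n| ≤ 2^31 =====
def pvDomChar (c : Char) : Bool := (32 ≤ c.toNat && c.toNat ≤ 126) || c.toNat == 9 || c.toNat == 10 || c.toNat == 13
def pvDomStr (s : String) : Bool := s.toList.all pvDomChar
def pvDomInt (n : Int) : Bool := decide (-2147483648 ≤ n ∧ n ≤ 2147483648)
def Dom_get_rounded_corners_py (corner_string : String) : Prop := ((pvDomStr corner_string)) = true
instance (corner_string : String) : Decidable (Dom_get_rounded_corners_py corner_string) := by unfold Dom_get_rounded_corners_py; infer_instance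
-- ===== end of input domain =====

-- B drops A's split()/dict-index/mutable-4-slot-list machinery: one hand-written character
-- scan folds each comma-separated token's bit into an integer mask, decoded into the tuple.

-- ===== PORT A =====
-- the corner_map dict of A (keys to list indices)
def pvCornerMap : PySem.Dict String Int :=
  PySem.Dict.mk [("top_left", 0), ("top_right", 1), ("bottom_right", 2), ("bottom_left", 3)]

-- the body of A's for-loop: strip the token, look it up, set the indexed slot
-- (result[corner_map[corner]] = True; the stored index is 0..3, so .toNat is exact here)
def pvStepA (result : List Bool) (corner : String) : List Bool :=
  let corner := PySem.Str.strip corner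
  if pvCornerMap.contains corner then
    result.set (pvCornerMap.getD corner 0).toNat true
  else result

def get_rounded_corners_py (corner_string : String) : Bool × Bool × Bool × Bool :=
  if corner_string == "all" then (true, true, true, true)
  else
    let corners := (PySem.Str.split? corner_string ",").getD []  -- sep "," ≠ "", so split? is some
    let result := corners.foldl pvStepA [false, false, false, false]
    (result.getD 0 false, result.getD 1 false, result.getD 2 false, result.getD 3 false)

-- ===== PORT B =====
-- _corner_bit: the if-chain mapping a corner name to its mask bit
def pvCornerBit (name : List Char) : Int :=
  if name = "top_left".toList then 1
  else if name = "top_right".toList then 2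
  else if name = "bottom_right".toList then 4
  else if name = "bottom_left".toList then 8
  else 0

-- loop body of B: state = (mask, current token); a ',' closes the token into the mask
def pvStepB (st : Int × List Char) (ch : Char) : Int × List Char :=
  if ch = ',' then (PySem.Int.bor st.1 (pvCornerBit (PySem.Chars.strip st.2)), [])
  else (st.1, st.2 ++ [ch])

def get_rounded_corners_py_alt (corner_string : String) : Bool × Bool × Bool × Bool :=
  if corner_string == "all" then (true, true, true, true)
  else
    let mask := ((corner_string.toList ++ [',']).foldl pvStepB (0, [])).1
    (PySem.Int.band mask 1 != 0, PySem.Int.band mask 2 != 0,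
     PySem.Int.band mask 4 != 0, PySem.Int.band mask 8 != 0)

-- ===== PRECONDITION & SPEC =====
def Spec_get_rounded_corners_py (corner_string : String) (out : Bool × Bool × Bool × Bool) : Prop := out = get_rounded_corners_py_alt corner_string
instance (corner_string : String) (out : Bool × Bool × Bool × Bool) : Decidable (Spec_get_rounded_corners_py corner_string out) := by unfold Spec_get_rounded_corners_py; infer_instance

-- ===== CLAIM (what is proved, stated in full; the proofs are below) =====
def Claim_equal_get_rounded_corners_py : Prop := ∀ (corner_string : String), Dom_get_rounded_corners_py corner_string → Spec_get_rounded_corners_py corner_string (get_rounded_corners_py corner_string)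

-- ===== LEMMAS AND PROOFS =====

-- reference tokenization: split a char list at commas, current token carried in order
def pvTokens : List Char → List Char → List (List Char)
  | [], cur => [cur]
  | c :: r, cur => if c = ',' then cur :: pvTokens r [] else pvTokens r (cur ++ [c])

-- PySem's splitOn on the one-char separator "," computes exactly pvTokens
lemma pvGo_eq (fuel : Nat) : ∀ (l cur : List Char) (acc : List (List Char)), l.length < fuel →
    PySem.Chars.splitOn.go [','] fuel l cur acc = acc.reverse ++ pvTokens l cur.reverse := by
  induction fuel with
  | zero => intro l cur acc h; omega
  | succ f ih =>
    intro l cur acc h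
    cases l with
    | nil => simp [PySem.Chars.splitOn.go, pvTokens]
    | cons c r =>
      by_cases hc : c = ','
      · subst hc
        rw [PySem.Chars.splitOn.go.eq_def]
        simp only [List.isPrefixOf]
        simp [pvTokens, ih r [] (cur.reverse :: acc) (by simpa using Nat.lt_of_succ_lt_succ h)]
      · rw [PySem.Chars.splitOn.go.eq_def]
        simp only [List.isPrefixOf]
        simp [hc, pvTokens, ih r (c :: cur) acc (by simpa using Nat.lt_of_succ_lt_succ h)]
        exact fun h' => absurd h'.symm hc

lemma pvSplit_eq (s : List Char) : PySem.Chars.splitOn s [','] = pvTokens s [] := by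
  unfold PySem.Chars.splitOn
  simpa using pvGo_eq (s.length + 1) s [] [] (by omega)

-- one A-loop step on a 4-slot state, written out by cases on the stripped token
lemma pvStepA_eq (a b c d : Bool) (t : String) :
    pvStepA [a, b, c, d] t
    = [a || decide (PySem.Str.strip t = "top_left"),
       b || decide (PySem.Str.strip t = "top_right"),
       c || decide (PySem.Str.strip t = "bottom_right"),
       d || decide (PySem.Str.strip t = "bottom_left")] := by
  by_cases h1 : PySem.Str.strip t = "top_left"
  · simp [pvStepA, h1, pvCornerMap, PySem.Dict.contains_mk, PySem.Dict.getD,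
          PySem.Dict.get?_mk_cons]
  · by_cases h2 : PySem.Str.strip t = "top_right"
    · simp [pvStepA, h2, pvCornerMap, PySem.Dict.contains_mk, PySem.Dict.getD,
            PySem.Dict.get?_mk_cons]
    · by_cases h3 : PySem.Str.strip t = "bottom_right"
      · simp [pvStepA, h3, pvCornerMap, PySem.Dict.contains_mk, PySem.Dict.getD,
              PySem.Dict.get?_mk_cons]
      · by_cases h4 : PySem.Str.strip t = "bottom_left"
        · simp [pvStepA, h4, pvCornerMap, PySem.Dict.contains_mk, PySem.Dict.getD,
                PySem.Dict.get?_mk_cons]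
        · simp [pvStepA, pvCornerMap, PySem.Dict.contains_mk,
                h1, h2, h3, h4, Ne.symm h1, Ne.symm h2, Ne.symm h3, Ne.symm h4]

-- A's loop, on any 4-slot state, ends with each slot = start value OR "the name occurs among the stripped tokens"
lemma pvFoldA_char (l : List String) : ∀ (a b c d : Bool),
    l.foldl pvStepA [a, b, c, d]
    = [a || l.any (fun t => PySem.Str.strip t = "top_left"),
       b || l.any (fun t => PySem.Str.strip t = "top_right"),
       c || l.any (fun t => PySem.Str.strip t = "bottom_right"),
       d || l.any (fun t => PySem.Str.strip t = "bottom_left")] := by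
  induction l with
  | nil => simp
  | cons t l ih =>
    intro a b c d
    rw [List.foldl_cons, pvStepA_eq, ih]
    simp [Bool.or_assoc]

-- the Nat value of a corner bit
def pvCornerBitN (name : List Char) : Nat :=
  if name = "top_left".toList then 1
  else if name = "top_right".toList then 2
  else if name = "bottom_right".toList then 4
  else if name = "bottom_left".toList then 8
  else 0

lemma pvCornerBit_cast (name : List Char) : pvCornerBit name = (pvCornerBitN name : Int) := by
  unfold pvCornerBit pvCornerBitN
  split_ifs <;> simp

-- B's char scan over l ++ [','] = an OR-fold of corner bits over the tokens of l
lemma pvFoldB (l : List Char) : ∀ (m : Nat) (tok : List Char),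
    (l ++ [',']).foldl pvStepB ((m : Int), tok)
    = ((((pvTokens l tok).foldl (fun m t => m ||| pvCornerBitN (PySem.Chars.strip t)) m : Nat) : Int), ([] : List Char)) := by
  induction l with
  | nil =>
    intro m tok
    simp [pvStepB, pvTokens, pvCornerBit_cast, PySem.Int.bor_natCast]
  | cons c r ih =>
    intro m tok
    by_cases hc : c = ','
    · subst hc
      simp only [List.cons_append, List.foldl_cons, pvStepB, if_true]
      rw [pvCornerBit_cast, PySem.Int.bor_natCast, ih]
      simp [pvTokens]
    · simp only [List.cons_append, List.foldl_cons, pvStepB, if_neg hc]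
      rw [ih]
      simp [pvTokens, hc]

lemma pvFoldB0 (l : List Char) (tok : List Char) :
    (l ++ [',']).foldl pvStepB (0, tok)
    = ((((pvTokens l tok).foldl (fun m t => m ||| pvCornerBitN (PySem.Chars.strip t)) 0 : Nat) : Int), ([] : List Char)) := by
  simpa using pvFoldB l 0 tok

-- test bit k of the OR-fold: it is set iff it starts set or some token contributes it
lemma pvMaskBit (toks : List (List Char)) : ∀ (m : Nat) (k : Nat),
    ((toks.foldl (fun m t => m ||| pvCornerBitN (PySem.Chars.strip t)) m).testBit k)
    = (m.testBit k || toks.any (fun t => (pvCornerBitN (PySem.Chars.strip t)).testBit k)) := by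
  induction toks with
  | nil => simp
  | cons t toks ih =>
    intro m k
    rw [List.foldl_cons, ih]
    simp [Nat.testBit_or, Bool.or_assoc]

-- decode mask & 2^k != 0 (k = 0..3) into a Nat test bit
lemma pvBandPow (M k : Nat) : (PySem.Int.band (M : Int) ((2 ^ k : Nat) : Int) != 0) = M.testBit k := by
  rw [PySem.Int.band_natCast]
  rcases h : M.testBit k with _ | _ <;> simp [Nat.and_two_pow, h]

-- the four bits of a corner-bit value name its corner
lemma pvBit0 (t : List Char) : (pvCornerBitN t).testBit 0 = decide (t = "top_left".toList) := by
  unfold pvCornerBitN; split_ifs with h1 h2 h3 h4 <;> simp_all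
lemma pvBit1 (t : List Char) : (pvCornerBitN t).testBit 1 = decide (t = "top_right".toList) := by
  unfold pvCornerBitN; split_ifs with h1 h2 h3 h4 <;> simp_all <;> decide
lemma pvBit2 (t : List Char) : (pvCornerBitN t).testBit 2 = decide (t = "bottom_right".toList) := by
  unfold pvCornerBitN; split_ifs with h1 h2 h3 h4 <;> simp_all <;> decide
lemma pvBit3 (t : List Char) : (pvCornerBitN t).testBit 3 = decide (t = "bottom_left".toList) := by
  unfold pvCornerBitN; split_ifs with h1 h2 h3 h4 <;> simp_all <;> decide

-- String-side any over A's token list = List-Char-side any over the mapped tokens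
lemma pvAnyStr (L : List String) (name : String) :
    L.any (fun t => decide (PySem.Str.strip t = name))
    = (L.map String.toList).any (fun t => decide (PySem.Chars.strip t = name.toList)) := by
  rw [List.any_map]
  congr 1
  funext t
  have : (PySem.Str.strip t = name) ↔ (PySem.Chars.strip t.toList = name.toList) := by
    rw [← PySem.Str.toList_strip]
    exact ⟨fun h => by rw [h], fun h => by apply String.ext; exact h⟩
  simp [Function.comp, this]

-- ===== VERDICT (by name: the statement is the Claim_ definition above) =====
theorem get_rounded_corners_py_spec : Claim_equal_get_rounded_corners_py := by
  intro s _
  unfold Spec_get_rounded_corners_py get_rounded_corners_py get_rounded_corners_py_alt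
  by_cases hall : s == "all"
  · simp [hall]
  · simp only [hall, Bool.false_eq_true, if_false]
    -- A's split produces some token list L with L.map toList = pvTokens s.toList []
    have hsplit := PySem.Str.split?_map s ","
    rw [show ("," : String).toList = [','] from rfl] at hsplit
    rw [show PySem.Chars.split? s.toList [','] = some (pvTokens s.toList []) by
      simp [PySem.Chars.split?, pvSplit_eq]] at hsplit
    cases hL : PySem.Str.split? s "," with
    | none => rw [hL] at hsplit; simp at hsplit
    | some L =>
      rw [hL] at hsplit
      simp only [Option.map_some, Option.some.injEq] at hsplit
      simp only [Option.getD_some]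
      rw [pvFoldA_char]
      rw [pvFoldB0]
      simp only [List.getD_cons_zero, List.getD_cons_succ, Bool.false_or]
      rw [show ((1 : Int)) = ((2 ^ 0 : Nat) : Int) by norm_num,
          show ((2 : Int)) = ((2 ^ 1 : Nat) : Int) by norm_num,
          show ((4 : Int)) = ((2 ^ 2 : Nat) : Int) by norm_num,
          show ((8 : Int)) = ((2 ^ 3 : Nat) : Int) by norm_num,
          pvBandPow, pvBandPow, pvBandPow, pvBandPow]
      rw [pvMaskBit, pvMaskBit, pvMaskBit, pvMaskBit]
      simp only [Nat.zero_testBit, Bool.false_or, pvBit0, pvBit1, pvBit2, pvBit3]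
      rw [pvAnyStr L "top_left", pvAnyStr L "top_right",
          pvAnyStr L "bottom_right", pvAnyStr L "bottom_left", hsplit]
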